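-- pv_equiv track=rewrite | github.com/MikhailPimenov/Algorithms-and-data-structures-Python | others/largest_sum_row_subsequence/largest_sum_row_subsequence.py | largest_sum_row_subsequence
-- ===== SOURCE A (Python) =====
-- def _sum_of_elements(sequence: list, first_index: int, last_index):
--     assert first_index >= 0
--     assert last_index >= 0
--     assert last_index >= first_index
--     assert first_index <= len(sequence)
--     assert last_index < len(sequence)
--
--     result = 0
--     for k in range(first_index, last_index):
--         result += sequence[k]
--
--     return result
--
-- def largest_sum_row_subsequence(sequence: list):
--     ff = [[0] * (len(sequence) + 1) for k in range(len(sequence) + 1)]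
--
--     for i in range(1, len(sequence) + 1):
--         for j in range(1, i + 1):
--             if j < i:
--                 ff[i][j] = ff[i - 1][j]
--             else:
--                 sums = [0] * j
--
--                 for s in range(j - 1):
--                     sums[s] = ff[i][j - (s + 1)]
--                     sums[s] += _sum_of_elements(sequence, j - (s + 1), j - 1)
--
--                 maximum = max(sums)
--
--                 if maximum > 0:
--                     ff[i][j] = sequence[i - 1] + maximum
--                 else:
--                     ff[i][j] = sequence[i - 1]
--
--     return max(*ff[len(sequence)])
-- ===== SOURCE B (Python) =====
-- # One-pass re-implementation: running DP value f and running maximum t of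
-- # (f_q + gap-sum) updated incrementally; O(n) instead of A's O(n^3) table.
-- def largest_sum_row_subsequence(sequence: list):
--     best = 0
--     t = None  # max over processed q of (f_q + sum of elements strictly after block q)
--     for x in sequence:
--         f = x if t is None else x + max(0, t)
--         t = f if t is None else max(t + x, f)
--         best = max(best, f)
--     return best
-- ===== Notes on version B (the rewrite author's own statement) =====
-- stated objective: faster
-- what changed: Replaced the O(n^3) DP table (which re-scans intermediate block sums with _sum_of_elements for every cell) by a single left-to-right pass that keeps the DP value f and a running maximum t of f_q plus the gap sum, updated incrementally.
import Mathlib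
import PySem

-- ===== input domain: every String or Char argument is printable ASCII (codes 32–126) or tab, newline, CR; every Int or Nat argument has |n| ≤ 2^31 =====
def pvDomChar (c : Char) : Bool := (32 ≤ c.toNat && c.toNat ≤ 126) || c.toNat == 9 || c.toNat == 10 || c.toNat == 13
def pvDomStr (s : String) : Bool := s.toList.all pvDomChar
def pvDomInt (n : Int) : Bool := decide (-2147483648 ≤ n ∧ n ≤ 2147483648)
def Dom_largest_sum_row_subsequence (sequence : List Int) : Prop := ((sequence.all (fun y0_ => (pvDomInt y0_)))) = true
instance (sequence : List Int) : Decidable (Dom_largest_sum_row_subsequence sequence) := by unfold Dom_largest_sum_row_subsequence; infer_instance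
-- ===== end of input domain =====

-- B replaces A's O(n^3) DP table (with block-sum rescans) by one O(n) pass carrying the DP value
-- and a running maximum updated incrementally; equivalence of the return value is proved on
-- nonempty inputs (A raises TypeError on []).

-- ===== PORT A =====
-- helper _sum_of_elements: sums sequence[k] for k in range(first, last); the asserts never fail
-- at A's call sites (indices in range), so they are not modelled.
def pvSumOfElements (sequence : List Int) (first last : Nat) : Int :=
  (List.range' first (last - first)).foldl (fun r k => r + sequence.getD k 0) 0

-- the body of the inner 'for j' loop (ff[i][j] = … ; in-range list indexing ported as getD)
def pvInnerStep (sequence : List Int) (i : Nat) (ff : List (List Int)) (j : Nat) :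
    List (List Int) :=
  if j < i then
    ff.set i ((ff.getD i []).set j ((ff.getD (i - 1) []).getD j 0))
  else
    let sums0 : List Int := List.replicate j 0
    let sums := (List.range (j - 1)).foldl
      (fun sums s =>
        sums.set s ((ff.getD i []).getD (j - (s + 1)) 0 +
          pvSumOfElements sequence (j - (s + 1)) (j - 1)))
      sums0
    let maximum := ((PySem.List.max? sums (fun x => x)).getD 0)
    ff.set i ((ff.getD i []).set j
      (if maximum > 0 then sequence.getD (i - 1) 0 + maximum else sequence.getD (i - 1) 0))

-- the body of the outer 'for i' loop
def pvOuterStep (sequence : List Int) (ff : List (List Int)) (i : Nat) : List (List Int) :=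
  (List.range' 1 i).foldl (pvInnerStep sequence i) ff

def largest_sum_row_subsequence (sequence : List Int) : Int :=
  let n := sequence.length
  let ff0 : List (List Int) := List.replicate (n + 1) (List.replicate (n + 1) 0)
  let ff := (List.range' 1 n).foldl (pvOuterStep sequence) ff0
  -- final max over the last table row; none (A's TypeError on the empty list) is excluded by Pre_
  ((PySem.List.max? (ff.getD n []) (fun x => x)).getD 0)

-- ===== PORT B =====
-- one loop iteration of Source B: state (best, t)
def pvAltStep (st : Int × Option Int) (x : Int) : Int × Option Int :=
  let f := match st.2 with | none => x | some t => x + max 0 t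
  let t' := match st.2 with | none => f | some t => max (t + x) f
  (max st.1 f, some t')

def largest_sum_row_subsequence_alt (sequence : List Int) : Int :=
  (sequence.foldl pvAltStep (0, (none : Option Int))).1

-- ===== PRECONDITION & SPEC =====
-- Pre_ excludes only the empty list, on which A raises TypeError (its final max splats a single int).
def Pre_largest_sum_row_subsequence (sequence : List Int) : Prop := sequence ≠ []
instance (sequence : List Int) : Decidable (Pre_largest_sum_row_subsequence sequence) := by
  unfold Pre_largest_sum_row_subsequence; infer_instance

def pvWitness_largest_sum_row_subsequence : List Int := [3, -1, 4, -10, 2]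

def Spec_largest_sum_row_subsequence (sequence : List Int) (out : Int) : Prop :=
  out = largest_sum_row_subsequence_alt sequence
instance (sequence : List Int) (out : Int) :
    Decidable (Spec_largest_sum_row_subsequence sequence out) := by
  unfold Spec_largest_sum_row_subsequence; infer_instance

-- ===== CLAIM (what is proved, stated in full; the proofs are below) =====
def Claim_equal_largest_sum_row_subsequence : Prop :=
  ∀ (sequence : List Int), Dom_largest_sum_row_subsequence sequence →
    Pre_largest_sum_row_subsequence sequence →
    Spec_largest_sum_row_subsequence sequence (largest_sum_row_subsequence sequence)

-- ===== LEMMAS AND PROOFS =====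

-- prefix sum P k = sum of the first k elements
def pvP (a : List Int) (k : Nat) : Int := (a.take k).sum

-- (f_k, M_k): f_k = DP value of A's column k; M_k = max_{1 ≤ q ≤ k} (f_q + P_k - P_q)
def pvFM (a : List Int) : Nat → Int × Int
  | 0 => (0, 0)
  | 1 => (a.getD 0 0, a.getD 0 0)
  | (k + 2) =>
      let p := pvFM a (k + 1)
      let f := a.getD (k + 1) 0 + max 0 p.2
      (f, max (p.2 + a.getD (k + 1) 0) f)

def pvF (a : List Int) (k : Nat) : Int := (pvFM a k).1
def pvM (a : List Int) (k : Nat) : Int := (pvFM a k).2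

-- the sums list A builds at the diagonal cell (i, i), with k = i - 1
def pvTerms (a : List Int) (k : Nat) : List Int :=
  (List.range k).map (fun s => pvF a (k - s) + pvP a k - pvP a (k - s))

-- running best of B after k elements
def pvBest (a : List Int) (k : Nat) : Int :=
  (List.range k).foldl (fun b q => max b (pvF a (q + 1))) 0

-- row r of the finished part of A's table: [0, f_1, …, f_r, 0, …, 0]
def pvRowA (a : List Int) (r : Nat) : List Int :=
  0 :: ((List.range r).map (fun q => pvF a (q + 1)) ++ List.replicate (a.length - r) 0)

-- A's table while the inner loop at outer index i has processed columns 1..j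
def pvMatP (a : List Int) (i j : Nat) : List (List Int) :=
  (List.range (a.length + 1)).map
    (fun r => if r < i then pvRowA a r else if r = i then pvRowA a j
              else List.replicate (a.length + 1) 0)


theorem pvP_succ (a : List Int) (k : Nat) (h : k < a.length) :
    pvP a (k + 1) = pvP a k + a.getD k 0 := by
  unfold pvP
  rw [List.take_add_one, List.sum_append, List.getElem?_eq_getElem h]
  simp [List.getD_eq_getElem?_getD, List.getElem?_eq_getElem h]

theorem pvF_one (a : List Int) : pvF a 1 = a.getD 0 0 := rfl

theorem pvM_one (a : List Int) : pvM a 1 = a.getD 0 0 := rfl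

theorem pvF_succ (a : List Int) (k : Nat) (hk : 1 ≤ k) :
    pvF a (k + 1) = a.getD k 0 + max 0 (pvM a k) := by
  obtain ⟨m, rfl⟩ := Nat.exists_eq_add_of_le hk
  simp [pvF, pvM, pvFM, Nat.add_comm 1 m]

theorem pvM_succ (a : List Int) (k : Nat) (hk : 1 ≤ k) :
    pvM a (k + 1) = max (pvM a k + a.getD k 0) (pvF a (k + 1)) := by
  obtain ⟨m, rfl⟩ := Nat.exists_eq_add_of_le hk
  simp [pvF, pvM, pvFM, Nat.add_comm 1 m]

theorem pvBest_succ (a : List Int) (k : Nat) :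
    pvBest a (k + 1) = max (pvBest a k) (pvF a (k + 1)) := by
  unfold pvBest
  rw [List.range_succ, List.foldl_append]
  rfl

theorem foldl_max_init (l : List Int) : ∀ x y : Int,
    l.foldl max (max x y) = max x (l.foldl max y) := by
  induction l with
  | nil => intro x y; simp
  | cons z t ih =>
    intro x y
    simp only [List.foldl_cons, max_assoc]
    exact ih x (max y z)

theorem foldl_max_map_add (l : List Int) : ∀ (w c : Int),
    (l.map (· + c)).foldl max w = (l.foldl max (w - c)) + c := by
  induction l with
  | nil => intro w c; simp
  | cons z t ih =>
    intro w c
    simp only [List.map_cons, List.foldl_cons]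
    rw [ih]
    have h : max w (z + c) - c = max (w - c) z := by omega
    rw [h]

theorem pvMax?_cons (z : Int) (l : List Int) :
    PySem.List.max? (z :: l) (fun x => x) = some (l.foldl max z) := by
  simp only [PySem.List.max?, List.foldl_cons]
  induction l generalizing z with
  | nil => simp
  | cons w t ih =>
    simp only [List.foldl_cons]
    have h : max z w = if z < w then w else z := by
      split
      · rename_i h; rw [max_eq_right (le_of_lt h)]
      · rename_i h; rw [max_eq_left (le_of_not_gt h)]
    rw [h]
    split <;> exact ih _

-- M_k is the maximum of A's sums terms (any initial accumulator x)
theorem pvTerms_foldl (a : List Int) : ∀ k, 1 ≤ k → k ≤ a.length → ∀ x : Int,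
    (pvTerms a k).foldl max x = max x (pvM a k) := by
  intro k
  induction k with
  | zero => omega
  | succ k ih =>
    intro _ hkn x
    by_cases hk : k = 0
    · subst hk
      simp only [Nat.zero_add]
      have h1 : pvTerms a 1 = [pvF a 1 + pvP a 1 - pvP a 1] := by simp [pvTerms]
      rw [h1]
      simp only [List.foldl_cons, List.foldl_nil, pvF_one, pvM_one]
      omega
    · have hk1 : 1 ≤ k := by omega
      have hterms : pvTerms a (k + 1) =
          (pvF a (k + 1) + pvP a (k + 1) - pvP a (k + 1)) ::
            (pvTerms a k).map (· + a.getD k 0) := by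
        unfold pvTerms
        rw [List.range_succ_eq_map, List.map_cons, List.map_map, List.map_map]
        refine List.cons_eq_cons.mpr ⟨by simp, ?_⟩
        apply List.map_congr_left
        intro s hs
        simp only [List.mem_range] at hs
        simp only [Function.comp, Nat.succ_eq_add_one]
        have h1 : k + 1 - (s + 1) = k - s := by omega
        rw [h1, pvP_succ a k (by omega)]
        ring
      rw [hterms, List.foldl_cons, foldl_max_init, foldl_max_map_add,
        ih hk1 (by omega) (pvF a (k + 1) + pvP a (k + 1) - pvP a (k + 1) - a.getD k 0)]
      rw [pvM_succ a k hk1]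
      simp only [List.getD_eq_getElem?_getD]
      omega

theorem pvRowA_zero (a : List Int) : pvRowA a 0 = List.replicate (a.length + 1) 0 := by
  simp [pvRowA, List.replicate_succ]

theorem pvRowA_getD (a : List Int) (r c : Nat) (hr : r ≤ a.length) (hc : c ≤ a.length) :
    (pvRowA a r).getD c 0 = if 1 ≤ c ∧ c ≤ r then pvF a c else 0 := by
  match c with
  | 0 => simp [pvRowA]
  | c' + 1 =>
    simp only [pvRowA, List.getD_cons_succ]
    simp only [List.getD_eq_getElem?_getD, List.getElem?_append, List.length_map,
      List.length_range]
    by_cases h : c' < r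
    · rw [if_pos h]
      simp only [List.getElem?_map, List.getElem?_range, h]
      rw [if_pos (by omega : 1 ≤ c' + 1 ∧ c' + 1 ≤ r)]
      simp
    · rw [if_neg h, List.getElem?_replicate]
      rw [if_pos (by omega : c' - r < a.length - r)]
      rw [if_neg (by omega : ¬ (1 ≤ c' + 1 ∧ c' + 1 ≤ r))]
      rfl

theorem pvRowA_set (a : List Int) (j : Nat) (hj : 1 ≤ j) (hjn : j ≤ a.length) :
    (pvRowA a (j - 1)).set j (pvF a j) = pvRowA a j := by
  obtain ⟨m, rfl⟩ := Nat.exists_eq_add_of_le hj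
  simp only [Nat.add_comm 1 m]
  rw [(by omega : m + 1 - 1 = m)]
  have hrep : List.replicate (a.length - m) (0 : Int) =
      0 :: List.replicate (a.length - (m + 1)) 0 := by
    rw [(by omega : a.length - m = (a.length - (m + 1)) + 1), List.replicate_succ]
  simp only [pvRowA, hrep, List.set_cons_succ]
  rw [List.set_append]
  simp only [List.length_map, List.length_range]
  rw [if_neg (by omega), (by omega : m - m = 0)]
  simp only [List.set_cons_zero]
  rw [List.range_succ, List.map_append]
  simp [List.append_assoc]

theorem pvMatP_getD (a : List Int) (i j r : Nat) (hr : r ≤ a.length) :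
    (pvMatP a i j).getD r [] =
      (if r < i then pvRowA a r else if r = i then pvRowA a j
       else List.replicate (a.length + 1) 0) := by
  have hr' : r < a.length + 1 := by omega
  simp [pvMatP, List.getD_eq_getElem?_getD, hr']

theorem pvMatP_set (a : List Int) (i j : Nat) (_hi : i ≤ a.length) (row : List Int) :
    (pvMatP a i j).set i row =
      (List.range (a.length + 1)).map
        (fun r => if r < i then pvRowA a r else if r = i then row
                  else List.replicate (a.length + 1) 0) := by
  apply List.ext_getElem
  · simp [pvMatP]
  · intro w h1 h2
    simp only [pvMatP, List.length_set, List.length_map, List.length_range] at h1 h2 ⊢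
    rw [List.getElem_set]
    simp only [List.getElem_map, List.getElem_range]
    split_ifs with hiw h2' h3 h4 <;> first | rfl | omega

-- a fold of set-s over range = map ++ untouched tail
theorem foldl_set_range (term : Nat → Int) (m : Nat) : ∀ (init : List Int), m ≤ init.length →
    (List.range m).foldl (fun l s => l.set s (term s)) init =
      (List.range m).map term ++ init.drop m := by
  induction m with
  | zero => intro init _; simp
  | succ m ih =>
    intro init h
    rw [List.range_succ, List.foldl_append, List.map_append]
    rw [ih init (by omega)]
    simp only [List.foldl_cons, List.foldl_nil]
    rw [List.set_append]
    simp only [List.length_map, List.length_range]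
    rw [if_neg (by omega)]
    have h0 : m - m = 0 := by omega
    rw [h0, List.drop_eq_getElem_cons (by omega : m < init.length), List.set_cons_zero]
    simp [List.append_assoc]

theorem pvSum_eq (a : List Int) : ∀ (c q : Nat), q + c ≤ a.length →
    pvSumOfElements a q (q + c) = pvP a (q + c) - pvP a q := by
  intro c
  induction c with
  | zero => intro q _; simp [pvSumOfElements, pvP]
  | succ c ih =>
    intro q h
    unfold pvSumOfElements at ih ⊢
    rw [(by omega : q + (c + 1) - q = c + 1), List.range'_concat, List.foldl_append]
    have ihq := ih q (by omega)
    rw [(by omega : q + c - q = c)] at ihq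
    rw [ihq]
    simp only [List.foldl_cons, List.foldl_nil]
    rw [(by omega : q + 1 * c = q + c), (by omega : q + (c + 1) = (q + c) + 1),
      pvP_succ a (q + c) (by omega)]
    ring

-- the copy step ff[i][j] = ff[i-1][j]  (1 ≤ j < i ≤ n)
theorem pvInnerStep_copy (a : List Int) (i j : Nat) (hj : 1 ≤ j) (hji : j < i)
    (hin : i ≤ a.length) :
    pvInnerStep a i (pvMatP a i (j - 1)) j = pvMatP a i j := by
  unfold pvInnerStep
  rw [if_pos hji]
  rw [pvMatP_getD a i (j - 1) i (by omega), pvMatP_getD a i (j - 1) (i - 1) (by omega)]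
  rw [if_neg (by omega), if_pos rfl, if_pos (by omega)]
  rw [pvRowA_getD a (i - 1) j (by omega) (by omega), if_pos (by omega)]
  rw [pvRowA_set a j hj (by omega)]
  rw [pvMatP_set a i (j - 1) (by omega)]
  rfl

-- the diagonal step ff[i][i] = … (1 ≤ i ≤ n)
theorem pvInnerStep_diag (a : List Int) (i : Nat) (hi : 1 ≤ i) (hin : i ≤ a.length) :
    pvInnerStep a i (pvMatP a i (i - 1)) i = pvMatP a i i := by
  unfold pvInnerStep
  rw [if_neg (by omega)]
  rw [pvMatP_getD a i (i - 1) i (by omega), if_neg (by omega), if_pos rfl]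
  have hsums :
      (List.range (i - 1)).foldl
        (fun sums s =>
          sums.set s ((pvRowA a (i - 1)).getD (i - (s + 1)) 0 +
            pvSumOfElements a (i - (s + 1)) (i - 1)))
        (List.replicate i 0) = pvTerms a (i - 1) ++ [0] := by
    rw [foldl_set_range _ (i - 1) (List.replicate i 0) (by simp)]
    congr 1
    · unfold pvTerms
      apply List.map_congr_left
      intro s hs
      simp only [List.mem_range] at hs
      have hq : i - (s + 1) = i - 1 - s := by omega
      rw [hq, pvRowA_getD a (i - 1) (i - 1 - s) (by omega) (by omega), if_pos (by omega)]
      have hsum := pvSum_eq a s (i - 1 - s) (by omega)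
      have hc : (i - 1 - s) + s = i - 1 := by omega
      rw [hc] at hsum
      rw [hsum]
      ring
    · rw [List.drop_replicate]
      have : i - (i - 1) = 1 := by omega
      rw [this]
      rfl
  simp only [hsums]
  by_cases hi1 : i = 1
  · subst hi1
    simp only [Nat.sub_self, pvTerms, List.range_zero, List.map_nil, List.nil_append]
    rw [pvMax?_cons]
    simp only [List.foldl_nil, Option.getD_some]
    rw [if_neg (by omega)]
    have hset := pvRowA_set a 1 (le_refl 1) (by omega : 1 ≤ a.length)
    rw [Nat.sub_self] at hset
    rw [← pvF_one a, hset, pvMatP_set a 1 0 (by omega)]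
    rfl
  · have hk1 : 1 ≤ i - 1 := by omega
    obtain ⟨hd, tl, hht⟩ : ∃ hd tl, pvTerms a (i - 1) = hd :: tl := by
      unfold pvTerms
      obtain ⟨m, hm⟩ := Nat.exists_eq_add_of_le hk1
      rw [hm]
      rw [(by omega : 1 + m = m + 1), List.range_succ_eq_map]
      exact ⟨_, _, rfl⟩
    rw [hht, List.cons_append, pvMax?_cons, Option.getD_some, List.foldl_append]
    simp only [List.foldl_cons, List.foldl_nil]
    have hmx : max (List.foldl max hd tl) 0 = max 0 (pvM a (i - 1)) := by
      have h1 : (pvTerms a (i - 1)).foldl max 0 = max 0 (pvM a (i - 1)) :=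
        pvTerms_foldl a (i - 1) hk1 (by omega) 0
      rw [hht, List.foldl_cons] at h1
      rw [foldl_max_init tl 0 hd] at h1
      omega
    rw [hmx]
    have hfi : pvF a i = a.getD (i - 1) 0 + max 0 (pvM a (i - 1)) := by
      have := pvF_succ a (i - 1) hk1
      rwa [(by omega : i - 1 + 1 = i)] at this
    have hval : (if max 0 (pvM a (i - 1)) > 0 then a.getD (i - 1) 0 + max 0 (pvM a (i - 1))
        else a.getD (i - 1) 0) = pvF a i := by
      rw [hfi]; split <;> omega
    rw [hval, pvRowA_set a i hi (by omega), pvMatP_set a i (i - 1) (by omega)]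
    rfl

-- the whole inner loop at outer index i
theorem pvInner_loop (a : List Int) (i : Nat) (hi : 1 ≤ i) (hin : i ≤ a.length) :
    ∀ j, j ≤ i → (List.range' 1 j).foldl (pvInnerStep a i) (pvMatP a i 0) = pvMatP a i j := by
  intro j
  induction j with
  | zero => intro _; simp
  | succ j ih =>
    intro hji
    have hr : List.range' 1 (j + 1) = List.range' 1 j ++ [1 + j] := by
      rw [List.range'_concat]
      simp
    rw [hr, List.foldl_append, ih (by omega)]
    simp only [List.foldl_cons, List.foldl_nil]
    by_cases hlt : 1 + j < i
    · have := pvInnerStep_copy a i (1 + j) (by omega) hlt hin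
      rw [(by omega : 1 + j - 1 = j)] at this
      rw [this]
      congr 1
      omega
    · have hieq : 1 + j = i := by omega
      rw [hieq]
      have := pvInnerStep_diag a i hi hin
      rw [(by omega : i - 1 = j)] at this
      rw [this]
      congr 1
      omega

theorem pvMatP_shift (a : List Int) (i : Nat) (_hin : i ≤ a.length) :
    pvMatP a i i = pvMatP a (i + 1) 0 := by
  unfold pvMatP
  apply List.map_congr_left
  intro r hr
  simp only [List.mem_range] at hr
  by_cases h1 : r < i
  · rw [if_pos h1, if_pos (by omega : r < i + 1)]
  · by_cases h2 : r = i
    · rw [if_neg h1, if_pos h2, if_pos (by omega : r < i + 1), h2]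
    · rw [if_neg h1, if_neg h2, if_neg (by omega : ¬ r < i + 1)]
      by_cases h3 : r = i + 1
      · rw [if_pos h3, pvRowA_zero]
      · rw [if_neg h3]

theorem pvMatP_init (a : List Int) :
    pvMatP a 1 0 = List.replicate (a.length + 1) (List.replicate (a.length + 1) 0) := by
  unfold pvMatP
  apply List.ext_getElem
  · simp
  · intro w h1 h2
    simp only [List.getElem_map, List.getElem_range, List.getElem_replicate]
    split_ifs with h3 h4
    · rw [(by omega : w = 0), pvRowA_zero]
    · rw [pvRowA_zero]
    · rfl

theorem pvOuter_loop (a : List Int) : ∀ i, i ≤ a.length →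
    (List.range' 1 i).foldl (pvOuterStep a)
        (List.replicate (a.length + 1) (List.replicate (a.length + 1) 0)) =
      pvMatP a (i + 1) 0 := by
  intro i
  induction i with
  | zero => intro _; simp [pvMatP_init]
  | succ i ih =>
    intro hin
    have hr : List.range' 1 (i + 1) = List.range' 1 i ++ [1 + i] := by
      rw [List.range'_concat]; simp
    rw [hr, List.foldl_append, ih (by omega)]
    simp only [List.foldl_cons, List.foldl_nil]
    unfold pvOuterStep
    simp only [Nat.add_comm 1 i]
    rw [pvInner_loop a (i + 1) (by omega) (by omega) (i + 1) (le_refl _)]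
    exact pvMatP_shift a (i + 1) (by omega)

-- A's result is the running best of the DP values
theorem portA_eq_best (a : List Int) : largest_sum_row_subsequence a = pvBest a a.length := by
  simp only [largest_sum_row_subsequence]
  rw [pvOuter_loop a a.length (le_refl _)]
  rw [pvMatP_getD a (a.length + 1) 0 a.length (le_refl _), if_pos (by omega)]
  unfold pvRowA
  simp only [Nat.sub_self, List.replicate_zero, List.append_nil]
  rw [pvMax?_cons, Option.getD_some]
  unfold pvBest
  rw [List.foldl_map]

-- B's loop invariant
theorem portB_loop (a : List Int) : ∀ k, k ≤ a.length →
    (a.take k).foldl pvAltStep (0, (none : Option Int)) =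
      (pvBest a k, if k = 0 then (none : Option Int) else some (pvM a k)) := by
  intro k
  induction k with
  | zero => intro _; rfl
  | succ k ih =>
    intro hk
    have hkl : k < a.length := by omega
    rw [List.take_add_one, List.getElem?_eq_getElem hkl]
    rw [List.foldl_append, ih (by omega)]
    simp only [Option.toList_some, List.foldl_cons, List.foldl_nil]
    have hget : a[k] = a.getD k 0 := by
      simp [List.getD_eq_getElem?_getD, List.getElem?_eq_getElem hkl]
    by_cases hk0 : k = 0
    · subst hk0
      simp only [Nat.zero_add, pvAltStep, if_neg (by omega : ¬ (1 = 0))]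
      rw [hget]
      have h1 : pvBest a 1 = max 0 (pvF a 1) := by simp [pvBest]
      rw [h1, pvF_one, pvM_one]
      rfl
    · rw [if_neg hk0, if_neg (by omega : ¬ (k + 1 = 0))]
      simp only [pvAltStep]
      rw [hget, pvBest_succ, pvM_succ a k (by omega), pvF_succ a k (by omega)]

theorem portB_eq_best (a : List Int) : largest_sum_row_subsequence_alt a = pvBest a a.length := by
  unfold largest_sum_row_subsequence_alt
  have h := portB_loop a a.length (le_refl _)
  rw [List.take_length] at h
  rw [h]

-- ===== VERDICT (by name: the statement is the Claim_ definition above) =====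
theorem largest_sum_row_subsequence_spec : Claim_equal_largest_sum_row_subsequence := by
  intro a _ _
  unfold Spec_largest_sum_row_subsequence
  rw [portA_eq_best, portB_eq_best]
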